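-- pv_equiv track=rewrite | github.com/BDDLR/coding-questions | winning_hands.py | is_valid_count
-- ===== SOURCE A (Python) =====
-- def is_valid_count(tile_dict):
--     is_valid_pair = False
--     for count in tile_dict.values():
--         if count != 2 and count != 3:
--             return False
--
--         if count == 2 and is_valid_pair == True:
--             return False
--
--         if count == 2:
--             is_valid_pair = True
--
--     return is_valid_pair
-- ===== SOURCE B (Python) =====
-- def is_valid_count(tile_dict):
--     counts = sorted(tile_dict.values())
--     return counts == [2] + [3] * (len(counts) - 1)
-- ===== Notes on version B (the rewrite author's own statement) =====
-- stated objective: alternative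
-- what changed: Replaces A's stateful one-pass loop (pair-seen flag, early returns) by sorting the counts and comparing them to the canonical template: a single 2 followed by all 3s.
import Mathlib
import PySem

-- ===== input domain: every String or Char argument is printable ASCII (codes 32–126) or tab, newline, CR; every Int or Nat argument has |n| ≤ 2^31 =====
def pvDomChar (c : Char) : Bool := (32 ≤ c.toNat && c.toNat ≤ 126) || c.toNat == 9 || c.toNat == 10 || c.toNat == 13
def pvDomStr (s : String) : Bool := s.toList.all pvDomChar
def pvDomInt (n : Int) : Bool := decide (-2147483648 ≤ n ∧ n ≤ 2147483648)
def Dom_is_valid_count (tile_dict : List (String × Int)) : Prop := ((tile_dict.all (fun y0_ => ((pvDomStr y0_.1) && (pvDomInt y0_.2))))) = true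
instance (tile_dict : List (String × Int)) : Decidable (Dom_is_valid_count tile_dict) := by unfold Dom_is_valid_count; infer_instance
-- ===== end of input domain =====

-- B replaces A's stateful one-pass loop (pair-seen flag, early returns) by sorting the
-- counts and comparing them to the canonical template (a single 2 followed by all 3s).  Objective: alternative.

-- ===== PORT A =====
-- A's for-loop over tile_dict.values() with the is_valid_pair flag and early returns
def isValidCountLoopA : List Int → Bool → Bool
  | [], is_valid_pair => is_valid_pair
  | count :: rest, is_valid_pair =>
    if count ≠ 2 ∧ count ≠ 3 then false
    else if count = 2 ∧ is_valid_pair = true then false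
    else if count = 2 then isValidCountLoopA rest true
    else isValidCountLoopA rest is_valid_pair

def is_valid_count (tile_dict : List (String × Int)) : Bool :=
  isValidCountLoopA (PySem.Dict.ofList tile_dict).values false

-- ===== PORT B =====
def is_valid_count_alt (tile_dict : List (String × Int)) : Bool :=
  let counts := PySem.List.sorted (PySem.Dict.ofList tile_dict).values (fun x => x) false
  counts == 2 :: List.replicate (counts.length - 1) 3

-- ===== PRECONDITION & SPEC =====
def Spec_is_valid_count (tile_dict : List (String × Int)) (out : Bool) : Prop := out = is_valid_count_alt tile_dict
instance (tile_dict : List (String × Int)) (out : Bool) : Decidable (Spec_is_valid_count tile_dict out) := by unfold Spec_is_valid_count; infer_instance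

-- ===== CLAIM (what is proved, stated in full; the proofs are below) =====
def Claim_equal_is_valid_count : Prop := ∀ (tile_dict : List (String × Int)), Dom_is_valid_count tile_dict → Spec_is_valid_count tile_dict (is_valid_count tile_dict)

-- ===== LEMMAS AND PROOFS =====

theorem isValidCountLoopA_char (l : List Int) (p : Bool) :
    isValidCountLoopA l p =
      decide ((∀ c ∈ l, c = 2 ∨ c = 3) ∧ l.count 2 + (if p then 1 else 0) = 1) := by
  induction l generalizing p with
  | nil => cases p <;> simp [isValidCountLoopA]
  | cons c rest ih =>
    simp only [isValidCountLoopA, List.count_cons]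
    by_cases h2 : c = 2
    · subst h2
      cases p <;> simp [ih]
    · by_cases h3 : c = 3
      · subst h3
        simp [ih]
      · simp [h2, h3]

theorem count3_of_mem (l : List Int) (h : ∀ c ∈ l, c = 2 ∨ c = 3) :
    l.count 3 = l.length - l.count 2 := by
  induction l with
  | nil => simp
  | cons c rest ih =>
    have hc := h c (by simp)
    have hrest := ih (fun x hx => h x (by simp [hx]))
    have hcle : rest.count 2 ≤ rest.length := List.count_le_length
    rcases hc with hc | hc <;> subst hc <;>
      simp [hrest] <;> omega

theorem sorted_template (vals : List Int) :
    (PySem.List.sorted vals (fun x => x) false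
      = 2 :: List.replicate (vals.length - 1) 3)
      ↔ ((∀ c ∈ vals, c = 2 ∨ c = 3) ∧ vals.count 2 = 1) := by
  constructor
  · intro h
    have hperm : (PySem.List.sorted vals (fun x => x) false).Perm vals :=
      PySem.List.sorted_perm vals (fun x => x) false
    constructor
    · intro c hc
      have : c ∈ (2 : Int) :: List.replicate (vals.length - 1) 3 := by
        rw [← h]; exact (hperm.mem_iff).mpr hc
      rcases List.mem_cons.mp this with h1 | h1
      · left; exact h1
      · right; exact List.eq_of_mem_replicate h1
    · have := hperm.count_eq 2
      rw [h] at this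
      simp [List.count_replicate] at this
      omega
  · rintro ⟨hmem, hcnt⟩
    have hne : vals ≠ [] := by
      intro h; subst h; simp at hcnt
    have hlen : 1 ≤ vals.length := by
      cases vals with
      | nil => exact absurd rfl hne
      | cons a t => simp
    have h3 : vals.count 3 = vals.length - 1 := by
      rw [count3_of_mem vals hmem, hcnt]
    -- the template is a sorted permutation of vals
    apply PySem.List.sorted_id_eq_of_perm_of_pairwise
    · -- Perm: equal counts everywhere
      rw [List.perm_iff_count]
      intro a
      by_cases ha2 : a = 2
      · subst ha2
        simp [List.count_replicate, hcnt]
      · by_cases ha3 : a = 3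
        · subst ha3
          simp [h3]
        · have : a ∉ vals := fun hx => by rcases hmem a hx with h | h <;> simp_all
          have hnot : a ∉ (2 : Int) :: List.replicate (vals.length - 1) 3 := by
            intro hx
            rcases List.mem_cons.mp hx with hx | hx
            · exact ha2 hx
            · exact ha3 (List.eq_of_mem_replicate hx)
          rw [List.count_eq_zero_of_not_mem this, List.count_eq_zero_of_not_mem hnot]
    · -- Pairwise ≤
      apply List.Pairwise.cons
      · intro b hb
        have := List.eq_of_mem_replicate hb
        subst this; norm_num
      · exact List.pairwise_replicate.mpr (Or.inr le_rfl)

-- ===== VERDICT (by name: the statement is the Claim_ definition above) =====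
theorem is_valid_count_spec : Claim_equal_is_valid_count := by
  intro tile_dict _
  unfold Spec_is_valid_count is_valid_count is_valid_count_alt
  rw [isValidCountLoopA_char]
  simp only [PySem.List.length_sorted]
  by_cases h : PySem.List.sorted (PySem.Dict.ofList tile_dict).values (fun x => x) false
      = 2 :: List.replicate ((PySem.Dict.ofList tile_dict).values.length - 1) 3
  · obtain ⟨h1, h2⟩ := (sorted_template _).mp h
    simp [h, h2]
    exact h1
  · have hb : ((PySem.List.sorted (PySem.Dict.ofList tile_dict).values (fun x => x) false)
        == 2 :: List.replicate ((PySem.Dict.ofList tile_dict).values.length - 1) 3) = false :=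
      beq_eq_false_iff_ne.mpr h
    rw [hb, decide_eq_false_iff_not]
    rintro ⟨h1, h2⟩
    exact h ((sorted_template _).mpr ⟨h1, by simpa using h2⟩)
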